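-- pv_equiv track=rewrite | github.com/keithwegner/knives-out | src/knives_out/runner.py | _status_matches_expected
-- ===== SOURCE A (Python) =====
-- def _status_matches_expected(status_code: int | None, expected_outcomes: list[str]) -> bool:
--     if status_code is None:
--         return False
--     for expected in expected_outcomes:
--         normalized = expected.strip().lower()
--         if not normalized:
--             continue
--         if normalized.endswith("xx") and len(normalized) == 3 and normalized[0].isdigit():
--             if status_code // 100 == int(normalized[0]):
--                 return True
--             continue
--         if normalized.isdigit() and status_code == int(normalized):
--             return True
--     return False
-- ===== SOURCE B (Python) =====
-- def _classify(expected):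
--     normalized = expected.strip().lower()
--     if normalized.isdigit():
--         return ("exact", int(normalized))
--     if len(normalized) == 3 and normalized[0].isdigit() and normalized[1:] == "xx":
--         return ("class", int(normalized[0]))
--     return None
--
--
-- def _status_matches_expected(status_code, expected_outcomes):
--     if status_code is None:
--         return False
--     targets = {t for t in map(_classify, expected_outcomes) if t is not None}
--     return ("exact", status_code) in targets or ("class", status_code // 100) in targets
-- ===== Notes on version B (the rewrite author's own statement) =====
-- stated objective: alternative
-- what changed: Replaces A's guarded early-return scan with a map/filter pipeline: a classifier parses each entry once into an optional tagged target ('exact' code or 'class' hundreds-digit, with the digit check reordered and the 'xx' tail tested by slicing instead of endswith), the targets are collected into a set, and the result is two set-membership lookups.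
import Mathlib
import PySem

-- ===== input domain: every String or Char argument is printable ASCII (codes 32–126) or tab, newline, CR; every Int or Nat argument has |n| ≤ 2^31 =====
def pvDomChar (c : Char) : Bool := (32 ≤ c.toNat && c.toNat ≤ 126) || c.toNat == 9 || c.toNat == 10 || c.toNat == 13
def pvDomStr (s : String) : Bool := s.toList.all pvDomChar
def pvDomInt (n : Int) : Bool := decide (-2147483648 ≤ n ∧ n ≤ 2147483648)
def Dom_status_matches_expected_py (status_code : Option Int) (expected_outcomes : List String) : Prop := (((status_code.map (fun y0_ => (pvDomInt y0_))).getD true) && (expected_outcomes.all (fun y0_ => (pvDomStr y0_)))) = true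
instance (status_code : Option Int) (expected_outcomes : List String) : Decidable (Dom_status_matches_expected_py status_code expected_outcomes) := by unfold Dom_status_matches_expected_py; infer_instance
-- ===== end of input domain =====

-- B replaces A's guarded early-return scan by a classifier mapped over the list: each entry is
-- parsed once into an optional tagged target ('exact' code or 'class' digit), the targets are
-- collected into a set, and the answer is two set-membership lookups; objective: alternative.

-- ===== PORT A =====
-- A's for-loop with early return, transcribed as structural recursion
def pvALoop (c : Int) : List String → Bool
  | [] => false
  | expected :: rest =>
    let normalized := PySem.Str.lower (PySem.Str.strip expected)
    if PySem.Str.len normalized = 0 then pvALoop c rest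
    else if PySem.Str.endswith normalized "xx" && (PySem.Str.len normalized == 3)
            && PySem.Chars.isdigit ((PySem.Str.pyGet? normalized 0).getD ' ') then
      if PySem.Int.floordiv c 100
          == (PySem.Int.ofStr? (String.ofList [(PySem.Str.pyGet? normalized 0).getD ' '])).getD 0
      then true else pvALoop c rest
    else if PySem.Str.strIsdigit normalized
            && c == (PySem.Int.ofStr? normalized).getD 0 then true
    else pvALoop c rest

def status_matches_expected_py (status_code : Option Int) (expected_outcomes : List String) : Bool :=
  match status_code with
  | none => false
  | some c => pvALoop c expected_outcomes

-- ===== PORT B =====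
-- B's _classify: one entry → optional tagged target (works on the char list, as Source B works on str)
def pvClassify (expected : String) : Option (String × Int) :=
  let n := PySem.Chars.lower (PySem.Chars.strip expected.toList)
  if PySem.Chars.strIsdigit n then
    some ("exact", (PySem.Int.ofChars? n).getD 0)
  else if (n.length == 3) && PySem.Chars.isdigit ((PySem.List.pyGet? n 0).getD ' ')
          && (PySem.List.slice n (some 1) none == ['x', 'x']) then
    some ("class", (PySem.Int.ofChars? [(PySem.List.pyGet? n 0).getD ' ']).getD 0)
  else none

def status_matches_expected_py_alt (status_code : Option Int) (expected_outcomes : List String) : Bool :=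
  match status_code with
  | none => false
  | some c =>
    let targets := PySem.Set.ofList (expected_outcomes.filterMap pvClassify)
    targets.contains ("exact", c) || targets.contains ("class", PySem.Int.floordiv c 100)

-- ===== PRECONDITION & SPEC =====
def Spec_status_matches_expected_py (status_code : Option Int) (expected_outcomes : List String) (out : Bool) : Prop := out = status_matches_expected_py_alt status_code expected_outcomes
instance (status_code : Option Int) (expected_outcomes : List String) (out : Bool) : Decidable (Spec_status_matches_expected_py status_code expected_outcomes out) := by unfold Spec_status_matches_expected_py; infer_instance

-- ===== CLAIM (what is proved, stated in full; the proofs are below) =====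
def Claim_equal_status_matches_expected_py : Prop := ∀ (status_code : Option Int) (expected_outcomes : List String), Dom_status_matches_expected_py status_code expected_outcomes → Spec_status_matches_expected_py status_code expected_outcomes (status_matches_expected_py status_code expected_outcomes)

-- ===== LEMMAS AND PROOFS =====

-- A's decision about one element of the list (proof-side restatement of the loop body)
def pvStep (c : Int) (expected : String) : Bool :=
  let normalized := PySem.Str.lower (PySem.Str.strip expected)
  if PySem.Str.len normalized = 0 then false
  else if PySem.Str.endswith normalized "xx" && (PySem.Str.len normalized == 3)
          && PySem.Chars.isdigit ((PySem.Str.pyGet? normalized 0).getD ' ') then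
    PySem.Int.floordiv c 100
      == (PySem.Int.ofStr? (String.ofList [(PySem.Str.pyGet? normalized 0).getD ' '])).getD 0
  else PySem.Str.strIsdigit normalized && c == (PySem.Int.ofStr? normalized).getD 0

theorem pvALoop_eq_any (c : Int) (outs : List String) :
    pvALoop c outs = outs.any (pvStep c) := by
  induction outs with
  | nil => rfl
  | cons e rest ih =>
    rw [pvALoop, List.any_cons]
    simp only [pvStep]
    split_ifs <;> simp_all

theorem pvStep_eq (c : Int) (e : String) :
    pvStep c e = (pvClassify e == some ("exact", c)
      || pvClassify e == some ("class", PySem.Int.floordiv c 100)) := by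
  rw [pvStep, pvClassify]
  have hxx : ("xx" : String).toList = ['x', 'x'] := by simp
  simp only [PySem.Str.len_eq, PySem.Str.endswith_eq, PySem.Str.pyGet?_eq, PySem.Str.strIsdigit_eq,
    PySem.Chars.pyGet?_eq_listPyGet?, PySem.Str.toList_lower, PySem.Str.toList_strip,
    PySem.Int.ofStr?, String.toList_ofList, hxx]
  generalize PySem.Chars.lower (PySem.Chars.strip e.toList) = m
  by_cases h3 : m.length = 3
  · obtain ⟨a, b, d, rfl⟩ := List.length_eq_three.mp h3
    have hget : PySem.List.pyGet? [a, b, d] 0 = some a := rfl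
    have hsl : PySem.List.slice [a, b, d] (some 1) none = [b, d] := by
      rw [PySem.List.slice_from _ (by norm_num)]; rfl
    have hend : PySem.Chars.endswith [a, b, d] ['x', 'x'] = (b == 'x' && d == 'x') := by
      rw [Bool.eq_iff_iff]
      simp [PySem.Chars.endswith_iff, List.suffix_cons_iff]
      exact ⟨fun h => ⟨h.1.symm, h.2.symm⟩, fun h => ⟨h.1.symm, h.2.symm⟩⟩
    simp only [hget, hsl, hend, Option.getD_some, List.length_cons, List.length_nil]
    by_cases hb : b = 'x' <;> by_cases hd : d = 'x'
    · subst hb hd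
      have hdig : PySem.Chars.strIsdigit [a, 'x', 'x'] = false := by
        simp [PySem.Chars.strIsdigit, show PySem.Chars.isdigit 'x' = false from by decide]
      by_cases ha : PySem.Chars.isdigit a = true
      · by_cases hv : PySem.Int.floordiv c 100 = (PySem.Int.ofChars? [a]).getD 0
        · rw [Bool.eq_iff_iff]; simp_all
        · rw [Bool.eq_iff_iff]; simp_all [Prod.ext_iff]; exact fun h => hv h.symm
      · simp [hdig, ha]
    · by_cases hs : PySem.Chars.strIsdigit [a, b, d] = true <;>
        by_cases hc : c = (PySem.Int.ofChars? [a, b, d]).getD 0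
      · rw [Bool.eq_iff_iff]; simp_all
      · rw [Bool.eq_iff_iff]; simp_all [Prod.ext_iff]; exact fun h => hc h.symm
      · rw [Bool.eq_iff_iff]; simp_all
      · rw [Bool.eq_iff_iff]; simp_all
    · by_cases hs : PySem.Chars.strIsdigit [a, b, d] = true <;>
        by_cases hc : c = (PySem.Int.ofChars? [a, b, d]).getD 0
      · rw [Bool.eq_iff_iff]; simp_all
      · rw [Bool.eq_iff_iff]; simp_all [Prod.ext_iff]; exact fun h => hc h.symm
      · rw [Bool.eq_iff_iff]; simp_all
      · rw [Bool.eq_iff_iff]; simp_all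
    · by_cases hs : PySem.Chars.strIsdigit [a, b, d] = true <;>
        by_cases hc : c = (PySem.Int.ofChars? [a, b, d]).getD 0
      · rw [Bool.eq_iff_iff]; simp_all
      · rw [Bool.eq_iff_iff]; simp_all [Prod.ext_iff]; exact fun h => hc h.symm
      · rw [Bool.eq_iff_iff]; simp_all
      · rw [Bool.eq_iff_iff]; simp_all
  · have h3' : (m.length == 3) = false := by simp [h3]
    have h3i : ((m.length : Int) == (3:Int)) = false := by
      simp only [beq_eq_false_iff_ne]; exact_mod_cast h3
    by_cases h0 : m = []
    · subst h0; simp_all [PySem.Chars.strIsdigit]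
    · have hne : ¬((m.length : Int) = 0) := by
        have : ¬ m.length = 0 := by simpa [List.length_eq_zero_iff] using h0
        exact_mod_cast this
      by_cases hs : PySem.Chars.strIsdigit m = true <;>
        by_cases hc : c = (PySem.Int.ofChars? m).getD 0
      · rw [Bool.eq_iff_iff]; simp_all
      · rw [Bool.eq_iff_iff]; simp_all [Prod.ext_iff]; exact fun h => hc h.symm
      · rw [Bool.eq_iff_iff]; simp_all
      · rw [Bool.eq_iff_iff]; simp_all

-- ===== VERDICT (by name: the statement is the Claim_ definition above) =====
theorem status_matches_expected_py_spec : Claim_equal_status_matches_expected_py := by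
  intro sc outs _
  unfold Spec_status_matches_expected_py status_matches_expected_py status_matches_expected_py_alt
  cases sc with
  | none => rfl
  | some c =>
    simp only []
    rw [pvALoop_eq_any, Bool.eq_iff_iff]
    simp only [List.any_eq_true, pvStep_eq, PySem.Set.contains_iff, PySem.Set.mem_ofList,
      List.mem_filterMap, Bool.or_eq_true, beq_iff_eq]
    constructor
    · rintro ⟨e, he, h | h⟩
      · exact Or.inl ⟨e, he, h⟩
      · exact Or.inr ⟨e, he, h⟩
    · rintro (⟨e, he, h⟩ | ⟨e, he, h⟩)
      · exact ⟨e, he, Or.inl h⟩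
      · exact ⟨e, he, Or.inr h⟩
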